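-- pv_equiv track=rewrite | github.com/jklypchak13/advent_of_code | 2025/day6/day6.py | process_operation
-- ===== SOURCE A (Python) =====
-- def get_column(i, lines):
--     value = ''
--     for line in lines:
--         if i >= len(line):
--             continue
--         value += line[i]
--     return value
--
-- def process_operation(operation, lines, i):
--     column = get_column(i, lines)
--     value = 1 if operation == '*' else 0
--     while column.strip() != '':
--         number = int(column)
--         if operation == '*':
--             value *= number
--         else:
--             value += number
--         i += 1
--         column = get_column(i, lines)
--     return i+1, value
-- ===== SOURCE B (Python) =====
-- def process_operation(operation, lines, i):
--     column = ''.join(line[i] for line in lines if i < len(line))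
--     if column.strip() == '':
--         return i + 1, 1 if operation == '*' else 0
--     end, rest = process_operation(operation, lines, i + 1)
--     number = int(column)
--     return end, number * rest if operation == '*' else number + rest
-- ===== Notes on version B (the rewrite author's own statement) =====
-- stated objective: alternative
-- what changed: Replaces A's iterative while-loop with a running accumulator (and character-by-character column concatenation) by a right-fold recursion on the column index that combines number and tail result on the way back, each column built by one join over a filtered comprehension; correctness of the swap rests on associativity and the identity element of * / +.
import Mathlib
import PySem

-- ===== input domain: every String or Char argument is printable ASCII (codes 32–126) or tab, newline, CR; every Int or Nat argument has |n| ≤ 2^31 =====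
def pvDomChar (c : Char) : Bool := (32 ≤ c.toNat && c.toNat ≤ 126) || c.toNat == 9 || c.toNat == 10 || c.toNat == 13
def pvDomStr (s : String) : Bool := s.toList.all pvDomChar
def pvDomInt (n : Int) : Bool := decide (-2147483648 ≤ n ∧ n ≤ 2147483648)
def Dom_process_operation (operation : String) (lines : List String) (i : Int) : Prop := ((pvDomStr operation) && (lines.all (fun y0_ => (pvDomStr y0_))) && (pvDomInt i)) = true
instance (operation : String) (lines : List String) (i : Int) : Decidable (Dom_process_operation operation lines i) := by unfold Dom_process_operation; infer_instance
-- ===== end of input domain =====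

-- B replaces A's while-loop with a running accumulator by a right-fold recursion on the
-- column index (combining on the way back), building each column by one join over a
-- filtered comprehension instead of character-by-character concatenation; same cost.

-- 0 ⊔ the longest line length: bounds the indices the walk can visit (termination fuel only)
def pvMaxLen : List String → Int
  | [] => 0
  | l :: ls => max (PySem.Str.len l) (pvMaxLen ls)

-- ===== PORT A =====
-- get_column: fold over lines appending line[i] unless i >= len(line); none = IndexError
def get_column (i : Int) (lines : List String) : Option (List Char) :=
  lines.foldl
    (fun acc line =>
      acc.bind (fun v =>
        if PySem.Str.len line ≤ i then some v
        else (PySem.Str.pyGet? line i).map (fun c => v ++ [c])))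
    (some [])

-- the while loop; fuel is only a totality guard (never exhausted for the fuel supplied below)
def pvLoopA (operation : String) (lines : List String) : Nat → Int → Int → Int × Int
  | 0, i, value => (i + 1, value)
  | fuel + 1, i, value =>
      let column := (get_column i lines).getD []
      if PySem.Chars.strip column ≠ [] then
        let number := (PySem.Int.ofChars? column).getD 0
        pvLoopA operation lines fuel (i + 1)
          (if operation = "*" then value * number else value + number)
      else (i + 1, value)

def process_operation (operation : String) (lines : List String) (i : Int) : Int × Int :=
  pvLoopA operation lines ((pvMaxLen lines - i).toNat + 1) i (if operation = "*" then 1 else 0)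

-- ===== PORT B =====
-- ''.join(...): sequence the optional characters (none = IndexError)
def pvJoinChars : List (Option Char) → Option (List Char)
  | [] => some []
  | o :: os =>
      match o, pvJoinChars os with
      | some c, some cs => some (c :: cs)
      | _, _ => none

-- ''.join(line[i] for line in lines if i < len(line))
def pvColumnB (lines : List String) (i : Int) : Option (List Char) :=
  pvJoinChars ((lines.filter (fun line => i < PySem.Str.len line)).map
    (fun line => PySem.Str.pyGet? line i))

-- the recursion of Source B; fuel is only a totality guard (never exhausted for the fuel supplied below)
def pvAltGo (operation : String) (lines : List String) : Nat → Int → Int × Int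
  | 0, i => (i + 1, if operation = "*" then 1 else 0)
  | fuel + 1, i =>
      let column := (pvColumnB lines i).getD []
      if PySem.Chars.strip column = [] then
        (i + 1, if operation = "*" then 1 else 0)
      else
        let p := pvAltGo operation lines fuel (i + 1)
        let number := (PySem.Int.ofChars? column).getD 0
        (p.1, if operation = "*" then number * p.2 else number + p.2)

def process_operation_alt (operation : String) (lines : List String) (i : Int) : Int × Int :=
  pvAltGo operation lines ((pvMaxLen lines - i).toNat + 1) i

-- ===== PRECONDITION & SPEC =====
-- column j of the grid: the characters line[j] of the lines long enough, in line order
def pvColumn (lines : List String) (j : Int) : List Char :=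
  lines.filterMap (fun line =>
    if (line.length : Int) ≤ j then none else PySem.List.pyGet? line.toList j)

-- column j readable: no line raises IndexError (negative j reaching past a line's start)
def pvReadable (lines : List String) (j : Int) : Bool :=
  lines.all (fun line =>
    decide ((line.length : Int) ≤ j) || (PySem.List.pyGet? line.toList j).isSome)

-- Pre_ excludes exactly the inputs where A raises: the start column i or a later visited
-- column (one reached through readable non-blank columns) that is unreadable (IndexError)
-- or non-blank but not int-parsable (ValueError); with no lines A never raises.
def Pre_process_operation (operation : String) (lines : List String) (i : Int) : Prop :=
  lines = [] ∨
    (pvReadable lines i = true ∧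
      ∀ j ∈ PySem.List.pyRange i ((lines.map (fun line => (line.length : Int))).foldr max 0) 1,
        (∀ k ∈ PySem.List.pyRange i j 1,
            pvReadable lines k = true ∧ PySem.Chars.strip (pvColumn lines k) ≠ []) →
        pvReadable lines j = true ∧
          (PySem.Chars.strip (pvColumn lines j) = [] ∨
            (PySem.Int.ofChars? (pvColumn lines j)).isSome = true))

instance (operation : String) (lines : List String) (i : Int) : Decidable (Pre_process_operation operation lines i) := by unfold Pre_process_operation; infer_instance

def pvWitness_process_operation : String × List String × Int := ("*", ["12", "34"], 0)

def Spec_process_operation (operation : String) (lines : List String) (i : Int) (out : Int × Int) : Prop := out = process_operation_alt operation lines i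
instance (operation : String) (lines : List String) (i : Int) (out : Int × Int) : Decidable (Spec_process_operation operation lines i out) := by unfold Spec_process_operation; infer_instance

-- ===== CLAIM (what is proved, stated in full; the proofs are below) =====
def Claim_equal_process_operation : Prop := ∀ (operation : String) (lines : List String) (i : Int), Dom_process_operation operation lines i → Pre_process_operation operation lines i → Spec_process_operation operation lines i (process_operation operation lines i)

-- ===== LEMMAS AND PROOFS =====

-- column j of the grid as A reads it (none = IndexError); used only by the proofs below
def pvCol : List String → Int → Option (List Char)
  | [], _ => some []
  | l :: ls, j =>
      if PySem.Str.len l ≤ j then pvCol ls j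
      else
        match PySem.Str.pyGet? l j, pvCol ls j with
        | some c, some cs => some (c :: cs)
        | _, _ => none

-- the fold of get_column, named (bridged to List.length/List.pyGet?) for the proofs
def pvFoldA (i : Int) (lines : List String) (acc : Option (List Char)) : Option (List Char) :=
  lines.foldl
    (fun acc line =>
      acc.bind (fun v =>
        if (line.length : Int) ≤ i then some v
        else (PySem.List.pyGet? line.toList i).map (fun c => v ++ [c])))
    acc

lemma pvFoldA_cons (i : Int) (l : String) (ls : List String) (acc : Option (List Char)) :
    pvFoldA i (l :: ls) acc =
      pvFoldA i ls (acc.bind (fun v =>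
        if (l.length : Int) ≤ i then some v
        else (PySem.List.pyGet? l.toList i).map (fun c => v ++ [c]))) := rfl

lemma pvFoldA_none (i : Int) (lines : List String) : pvFoldA i lines none = none := by
  induction lines with
  | nil => rfl
  | cons l ls ih => rw [pvFoldA_cons]; simpa using ih

lemma pvFoldA_some (i : Int) (lines : List String) : ∀ v : List Char,
    pvFoldA i lines (some v) = (pvCol lines i).map (v ++ ·) := by
  induction lines with
  | nil => intro v; simp [pvFoldA, pvCol]
  | cons l ls ih =>
    intro v
    rw [pvFoldA_cons]
    by_cases h : (l.length : Int) ≤ i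
    · simp [h, ih, pvCol]
    · cases hg : PySem.List.pyGet? l.toList i with
      | none => simp [h, hg, pvFoldA_none, pvCol]
      | some c =>
        cases hc : pvCol ls i with
        | none => simp [h, hg, hc, ih, pvCol]
        | some cs => simp [h, hg, hc, ih, pvCol]

lemma get_column_eq_pvCol (i : Int) (lines : List String) :
    get_column i lines = pvCol lines i := by
  have : get_column i lines = pvFoldA i lines (some []) := rfl
  rw [this, pvFoldA_some i lines []]
  cases pvCol lines i <;> simp

-- the column list of Source B's comprehension, bridged to List.length/List.pyGet? for the proofs
def pvColsB (i : Int) (lines : List String) : List (Option Char) :=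
  (lines.filter (fun line => decide (i < (line.length : Int)))).map
    (fun line => PySem.List.pyGet? line.toList i)

lemma pvJoinChars_pvColsB (i : Int) (lines : List String) :
    pvJoinChars (pvColsB i lines) = pvCol lines i := by
  induction lines with
  | nil => rfl
  | cons l ls ih =>
    by_cases h : (l.length : Int) ≤ i
    · have h' : ¬ i < (l.length : Int) := not_lt.mpr h
      have hs : pvColsB i (l :: ls) = pvColsB i ls := by
        simp [pvColsB, h']
      rw [hs, ih]
      simp [pvCol, h]
    · have h' : i < (l.length : Int) := lt_of_not_ge h
      have hs : pvColsB i (l :: ls) = PySem.List.pyGet? l.toList i :: pvColsB i ls := by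
        simp [pvColsB, h']
      rw [hs]
      cases hg : PySem.List.pyGet? l.toList i with
      | none => simp [pvJoinChars, pvCol, h, hg]
      | some c =>
        cases hc : pvCol ls i with
        | none => rw [hc] at ih; simp [pvJoinChars, pvCol, h, hg, hc, ih]
        | some cs => rw [hc] at ih; simp [pvJoinChars, pvCol, h, hg, hc, ih]

lemma pvColumnB_eq_pvCol (lines : List String) (i : Int) :
    pvColumnB lines i = pvCol lines i := by
  have : pvColumnB lines i = pvJoinChars (pvColsB i lines) := rfl
  rw [this, pvJoinChars_pvColsB]

lemma pvCol_blank_of_ge (lines : List String) (j : Int) (h : pvMaxLen lines ≤ j) :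
    pvCol lines j = some [] := by
  induction lines with
  | nil => rfl
  | cons l ls ih =>
    have h1 : (l.length : Int) ≤ j := by
      have := le_trans (le_max_left (PySem.Str.len l) (pvMaxLen ls)) h
      simpa using this
    have h2 : pvMaxLen ls ≤ j :=
      le_trans (le_max_right (PySem.Str.len l) (pvMaxLen ls)) h
    simp [pvCol, h1, ih h2]

lemma lt_maxLen_of_nonblank (lines : List String) (j : Int)
    (h : PySem.Chars.strip ((pvCol lines j).getD []) ≠ []) : j < pvMaxLen lines := by
  by_contra hc
  have := pvCol_blank_of_ge lines j (le_of_not_gt hc)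
  rw [this] at h
  exact h (by decide)

lemma loop_eq (operation : String) (lines : List String) :
    ∀ (fuel : Nat) (i value : Int), (pvMaxLen lines - i).toNat < fuel →
      pvLoopA operation lines fuel i value =
        ((pvAltGo operation lines fuel i).1,
         if operation = "*" then value * (pvAltGo operation lines fuel i).2
         else value + (pvAltGo operation lines fuel i).2) := by
  intro fuel
  induction fuel with
  | zero => intro i value h; exact absurd h (Nat.not_lt_zero _)
  | succ fuel ih =>
    intro i value h
    rw [pvLoopA, pvAltGo]
    simp only [get_column_eq_pvCol, pvColumnB_eq_pvCol]
    by_cases hb : PySem.Chars.strip ((pvCol lines i).getD []) = []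
    · simp only [hb]
      simp only [ne_eq, not_true_eq_false, if_false, if_true]
      by_cases hop : operation = "*" <;> simp [hop]
    · have hlt : i < pvMaxLen lines := lt_maxLen_of_nonblank lines i hb
      have hfuel : (pvMaxLen lines - (i + 1)).toNat < fuel := by omega
      simp only [hb, ne_eq, not_false_eq_true, if_true, if_false]
      rw [ih (i + 1) _ hfuel]
      by_cases hop : operation = "*" <;> simp [hop, mul_assoc, add_assoc]

-- ===== VERDICT (by name: the statement is the Claim_ definition above) =====
theorem process_operation_spec : Claim_equal_process_operation := by
  intro operation lines i _ _
  unfold Spec_process_operation process_operation process_operation_alt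
  rw [loop_eq operation lines _ i _ (Nat.lt_succ_self _)]
  by_cases hop : operation = "*" <;> simp [hop]
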